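-- pv_equiv track=rewrite | github.com/0xPuddi/Algorithms | src/data_structures/disjoint_sets.py | check_same_component
-- ===== SOURCE A (Python) =====
-- def check_same_component(x, y, A, M):
--     x = M.get(x)
--     while x != A[x]:
--         x = A[x]
--
--     y = M.get(y)
--     while y != A[y]:
--         y = A[y]
--
--     return x == y
-- ===== SOURCE B (Python) =====
-- def check_same_component(x, y, A, M):
--     def find(z):
--         # A root is a fixed point of the parent map; iterating len(A) times
--         # from any node of a parent forest lands on (and stays at) its root,
--         # so no termination test is needed.
--         for _ in range(len(A)):
--             z = A[z]
--         return z
--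
--     return find(M.get(x)) == find(M.get(y))
-- ===== Notes on version B (the rewrite author's own statement) =====
-- stated objective: alternative
-- what changed: B replaces A's two test-until-fixpoint while-loops by an oblivious helper that applies the parent map exactly len(A) times (roots are fixed points, so overshooting is harmless), removing the per-step comparison x != A[x].
import Mathlib
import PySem

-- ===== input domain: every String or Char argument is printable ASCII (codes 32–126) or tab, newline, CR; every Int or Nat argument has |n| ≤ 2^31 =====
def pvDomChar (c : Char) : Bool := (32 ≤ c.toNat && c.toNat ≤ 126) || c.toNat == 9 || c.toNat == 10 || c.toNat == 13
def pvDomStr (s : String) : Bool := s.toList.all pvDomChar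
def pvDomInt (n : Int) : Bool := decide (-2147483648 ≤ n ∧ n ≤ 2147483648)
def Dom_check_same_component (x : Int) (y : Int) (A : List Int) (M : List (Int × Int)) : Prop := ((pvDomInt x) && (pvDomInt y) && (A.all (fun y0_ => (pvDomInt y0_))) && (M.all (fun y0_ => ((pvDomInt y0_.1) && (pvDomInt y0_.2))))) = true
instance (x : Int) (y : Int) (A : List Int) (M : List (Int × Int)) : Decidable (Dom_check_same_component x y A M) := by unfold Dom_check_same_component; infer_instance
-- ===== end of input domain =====

-- B applies the parent map a fixed len(A) times instead of A's test-until-fixpoint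
-- while-loops; return values agree wherever Python A terminates normally (Pre_).

-- ===== PORT A =====
-- the while loop 'while z != A[z]: z = A[z]'; fuel A.length + 1 suffices on Pre_
-- (a terminating chain visits pairwise distinct residues mod len(A));
-- on pyGet? = none Python raises, the port's returned value there is irrelevant (outside Pre_)
def findLoopA (A : List Int) : Nat → Int → Int
  | 0, z => z
  | fuel + 1, z =>
    match PySem.List.pyGet? A z with
    | none => z
    | some v => if z = v then z else findLoopA A fuel v

def check_same_component (x : Int) (y : Int) (A : List Int) (M : List (Int × Int)) : Bool :=
  match (PySem.Dict.ofList M).get? x with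
  | none => false   -- Python: A[None] raises TypeError (outside Pre_)
  | some a =>
    let rx := findLoopA A (A.length + 1) a
    match (PySem.Dict.ofList M).get? y with
    | none => false
    | some b =>
      let ry := findLoopA A (A.length + 1) b
      rx == ry

-- ===== PORT B =====
-- one step 'z = A[z]' of the for body; z may be Python None (A[None]: TypeError → outer none),
-- an out-of-range index raises too (IndexError → outer none)
def stepB (A : List Int) (w : Option Int) : Option (Option Int) :=
  match w with
  | none => none
  | some v =>
    match PySem.List.pyGet? A v with
    | none => none
    | some u => some (some u)

-- 'for _ in range(len(A)): z = A[z]'; outer none = the loop raised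
def findB (A : List Int) (z : Option Int) : Option (Option Int) :=
  (List.range A.length).foldl (fun oz _ => oz.bind (stepB A)) (some z)

def check_same_component_alt (x : Int) (y : Int) (A : List Int) (M : List (Int × Int)) : Bool :=
  match findB A ((PySem.Dict.ofList M).get? x), findB A ((PySem.Dict.ofList M).get? y) with
  | some ra, some rb => ra == rb
  | _, _ => false

-- ===== PRECONDITION & SPEC =====
-- chainIter A k z = the node reached after following parent pointers k times (none = IndexError);
-- stated with library iteration, not a hand-rolled loop
def chainIter (A : List Int) (k : Nat) (z : Int) : Option Int :=
  (fun o => o.bind (PySem.List.pyGet? A))^[k] (some z)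

-- rootedWithin A k a: following parents k times from a reaches a self-parent (a root)
def rootedWithin (A : List Int) (k : Nat) (a : Int) : Bool :=
  match chainIter A k a with
  | none => false
  | some r => PySem.List.pyGet? A r == some r

-- startRooted A o: o is a present key's value and its parent chain reaches a root within len(A) steps
def startRooted (A : List Int) (o : Option Int) : Bool :=
  match o with
  | none => false
  | some a => (List.range (A.length + 1)).any (fun k => rootedWithin A k a)

-- Pre_: x and y are keys of M, and from each mapped start the parent chain reaches a
-- root within len(A) steps; otherwise Python A raises (TypeError/IndexError) or loops forever.
def Pre_check_same_component (x : Int) (y : Int) (A : List Int) (M : List (Int × Int)) : Prop :=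
  startRooted A ((PySem.Dict.ofList M).get? x) = true ∧
  startRooted A ((PySem.Dict.ofList M).get? y) = true

instance (x : Int) (y : Int) (A : List Int) (M : List (Int × Int)) : Decidable (Pre_check_same_component x y A M) := by
  unfold Pre_check_same_component; infer_instance

def pvWitness_check_same_component : Int × Int × List Int × (List (Int × Int)) :=
  (0, 1, [0, 1], [(0, 0), (1, 1)])

def Spec_check_same_component (x : Int) (y : Int) (A : List Int) (M : List (Int × Int)) (out : Bool) : Prop := out = check_same_component_alt x y A M
instance (x : Int) (y : Int) (A : List Int) (M : List (Int × Int)) (out : Bool) : Decidable (Spec_check_same_component x y A M out) := by unfold Spec_check_same_component; infer_instance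

-- ===== CLAIM (what is proved, stated in full; the proofs are below) =====
def Claim_equal_check_same_component : Prop := ∀ (x : Int) (y : Int) (A : List Int) (M : List (Int × Int)), Dom_check_same_component x y A M → Pre_check_same_component x y A M → Spec_check_same_component x y A M (check_same_component x y A M)

-- ===== LEMMAS AND PROOFS =====

theorem chainIter_succ' (A : List Int) (k : Nat) (a : Int) :
    chainIter A (k + 1) a = (chainIter A k a).bind (PySem.List.pyGet? A) :=
  Function.iterate_succ_apply' _ _ _

-- peeling one step off the front of the chain
theorem chainIter_succ_head (A : List Int) (k : Nat) (a : Int) :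
    chainIter A (k + 1) a =
      match PySem.List.pyGet? A a with
      | none => none
      | some v => chainIter A k v := by
  show (fun o => o.bind (PySem.List.pyGet? A))^[k + 1] (some a) = _
  rw [Function.iterate_succ_apply]
  cases h : PySem.List.pyGet? A a with
  | none =>
    show (fun o => o.bind (PySem.List.pyGet? A))^[k] ((some a).bind _) = _
    simp only [Option.bind, h]
    exact Function.iterate_fixed rfl k
  | some v =>
    show (fun o => o.bind (PySem.List.pyGet? A))^[k] ((some a).bind _) = _
    simp only [Option.bind, h]
    rfl

-- iterating from a root stays at the root
theorem chainIter_root (A : List Int) (r : Int) (hr : PySem.List.pyGet? A r = some r) :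
    ∀ k, chainIter A k r = some r := by
  intro k; induction k with
  | zero => rfl
  | succ k ih => rw [chainIter_succ', ih]; simpa using hr

theorem findB_eq_chainIter (A : List Int) (a : Int) :
    findB A (some a) = (chainIter A A.length a).map some := by
  unfold findB
  generalize A.length = n
  induction n with
  | zero => rfl
  | succ n ih =>
    rw [List.range_succ, List.foldl_append, ih, chainIter_succ']
    cases h : chainIter A n a with
    | none => rfl
    | some r =>
      show stepB A (some r) = (PySem.List.pyGet? A r).map some
      cases hu : PySem.List.pyGet? A r <;> simp [stepB, hu]

-- A's loop reaches the same root, with any sufficient fuel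
theorem findLoopA_eq (A : List Int) :
    ∀ (k : Nat) (a r : Int), chainIter A k a = some r → PySem.List.pyGet? A r = some r →
    ∀ m, k ≤ m → findLoopA A m a = r := by
  intro k
  induction k with
  | zero =>
    intro a r hc hr m _
    have ha : a = r := by simpa [chainIter] using hc
    subst ha
    cases m with
    | zero => rfl
    | succ m => simp [findLoopA, hr]
  | succ k ih =>
    intro a r hc hr m hm
    cases m with
    | zero => omega
    | succ m =>
      rw [chainIter_succ_head] at hc
      cases h : PySem.List.pyGet? A a with
      | none => rw [h] at hc; cases hc
      | some v =>
        have hc' : chainIter A k v = some r := by rwa [h] at hc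
        by_cases hav : a = v
        · subst hav
          have : chainIter A k a = some a := chainIter_root A a h k
          rw [this] at hc'
          cases hc'
          simp [findLoopA, h]
        · simp only [findLoopA, h]
          rw [if_neg hav]
          exact ih v r hc' hr m (Nat.le_of_succ_le_succ hm)

-- combined: under the rooted-chain hypothesis both finders return the root
theorem finders_agree (A : List Int) (a : Int)
    (h : startRooted A (some a) = true) :
    ∃ r, findB A (some a) = some (some r) ∧ findLoopA A (A.length + 1) a = r := by
  obtain ⟨k, hk, hrt⟩ : ∃ k, k < A.length + 1 ∧ rootedWithin A k a = true := by
    simpa [startRooted, List.any_eq_true] using h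
  unfold rootedWithin at hrt
  cases hc : chainIter A k a with
  | none => simp [hc] at hrt
  | some r =>
    rw [hc] at hrt
    have hr : PySem.List.pyGet? A r = some r := by simpa using hrt
    refine ⟨r, ?_, findLoopA_eq A k a r hc hr _ (by omega)⟩
    rw [findB_eq_chainIter]
    have hfull : chainIter A A.length a = some r := by
      obtain ⟨j, hj⟩ : ∃ j, A.length = k + j := ⟨A.length - k, by omega⟩
      rw [hj]
      clear hj
      induction j with
      | zero => simpa using hc
      | succ j ihj =>
        show chainIter A (k + j + 1) a = some r
        rw [chainIter_succ', ihj]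
        simpa using hr
    rw [hfull]
    rfl

-- ===== VERDICT (by name: the statement is the Claim_ definition above) =====
theorem check_same_component_spec : Claim_equal_check_same_component := by
  intro x y A M _ hpre
  obtain ⟨hx, hy⟩ := hpre
  cases hax : (PySem.Dict.ofList M).get? x with
  | none => rw [hax] at hx; simp [startRooted] at hx
  | some a =>
  cases hby : (PySem.Dict.ofList M).get? y with
  | none => rw [hby] at hy; simp [startRooted] at hy
  | some b =>
  rw [hax] at hx; rw [hby] at hy
  obtain ⟨ra, hBa, hAa⟩ := finders_agree A a hx
  obtain ⟨rb, hBb, hAb⟩ := finders_agree A b hy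
  unfold Spec_check_same_component check_same_component check_same_component_alt
  simp only [hax, hby, hBa, hBb, hAa, hAb]
  simp
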